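-- pv_equiv track=rewrite | github.com/Miles0sage/lore-agents | phalanx/evolution/darwin.py | _extract_common_prefixes
-- ===== SOURCE A (Python) =====
-- from collections import Counter, defaultdict
--
-- def _extract_common_prefixes(actions: list[str]) -> list[str]:
--     """Extract common action prefixes for glob pattern generation.
--
--     Skips patterns that are too broad: those shorter than 10 characters
--     (e.g. "tool:" or "a:") would match a large fraction of normal agent
--     actions and act as an accidental wildcard block.
--
--     O(n) single-pass: zip the first action's segments against all others
--     rather than building a set per segment index.
--     """
--     if not actions:
--         return []
--
--     # Split actions by delimiter and find common prefixes
--     split_actions = [a.split(":") for a in actions]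
--
--     if len(split_actions) == 1:
--         # Single action — use the full action as prefix
--         candidate = actions[0] + ":"
--         return [candidate] if len(candidate) >= 10 else []
--
--     # Single-pass O(n): use the first action as the reference and compare
--     # each subsequent action's segments against it, stopping at first mismatch.
--     reference = split_actions[0]
--     common_depth = len(reference)
--     for parts in split_actions[1:]:
--         # Walk segments pairwise until they diverge
--         depth = 0
--         for seg_a, seg_b in zip(reference, parts):
--             if seg_a == seg_b:
--                 depth += 1
--             else:
--                 break
--         common_depth = min(common_depth, depth)
--
--     prefixes: list[str] = []
--     if common_depth > 0:
--         prefix = ":".join(reference[:common_depth]) + ":"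
--         prefixes = [prefix]
--     else:
--         # No common prefix — use most frequent first segment (single Counter pass)
--         first_segments = [parts[0] for parts in split_actions]
--         most_common = Counter(first_segments).most_common(1)
--         if most_common:
--             prefixes = [most_common[0][0] + ":"]
--
--     # Filter out patterns that are too broad (< 10 chars would match too
--     # many normal actions, effectively a wildcard block on everything)
--     return [p for p in prefixes if len(p) >= 10]
-- ===== SOURCE B (Python) =====
-- def _extract_common_prefixes(actions: list[str]) -> list[str]:
--     """Column-major: count leading unanimous segment columns via zip(*rows)."""
--     if not actions:
--         return []
--     rows = [a.split(":") for a in actions]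
--     depth = 0
--     for col in zip(*rows):
--         if len(set(col)) != 1:
--             break
--         depth += 1
--     if depth > 0:
--         candidate = ":".join(rows[0][:depth]) + ":"
--     else:
--         counts = {}
--         for parts in rows:
--             counts[parts[0]] = counts.get(parts[0], 0) + 1
--         candidate = max(counts, key=counts.get) + ":"
--     return [candidate] if len(candidate) >= 10 else []
-- ===== Notes on version B (the rewrite author's own statement) =====
-- stated objective: simpler
-- what changed: A scans row-by-row (each later action's segments against the first, min-accumulating the agreement depth, with a separate single-action branch); B makes one column-major pass over zip(*rows), counting leading unanimous segment columns, which subsumes the single-action case, and replaces Counter.most_common(1) by a plain dict count with max(counts, key=counts.get).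
import Mathlib
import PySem

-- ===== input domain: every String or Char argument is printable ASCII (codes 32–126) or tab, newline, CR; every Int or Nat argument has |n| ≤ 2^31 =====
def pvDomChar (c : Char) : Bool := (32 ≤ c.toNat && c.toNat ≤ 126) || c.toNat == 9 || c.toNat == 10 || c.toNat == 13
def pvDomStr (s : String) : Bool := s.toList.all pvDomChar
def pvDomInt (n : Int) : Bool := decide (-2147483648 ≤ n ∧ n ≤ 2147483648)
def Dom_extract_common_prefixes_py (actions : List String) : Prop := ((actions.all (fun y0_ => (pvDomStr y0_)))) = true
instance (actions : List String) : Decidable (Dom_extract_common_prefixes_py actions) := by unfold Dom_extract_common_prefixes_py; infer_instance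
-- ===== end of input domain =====

-- B replaces A's row-by-row reference scan (with its separate single-action branch) by one
-- column-major scan over the segment columns; objective: simpler, same asymptotic cost.

-- ===== PORT A =====
-- inner 'for seg_a, seg_b in zip(...)' loop with break: leading agreement length
def pyAgreeDepth : List String → List String → Nat
  | a :: as, b :: bs => if a = b then pyAgreeDepth as bs + 1 else 0
  | _, _ => 0

-- Counter(...).most_common(1): CPython nlargest(1) = first item with maximal count
def pyMostCommon1 (items : List (String × Int)) : List (String × Int) :=
  match items with
  | [] => []
  | x :: rest => [rest.foldl (fun best kv => if best.2 < kv.2 then kv else best) x]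

def extract_common_prefixes_py (actions : List String) : List String :=
  match actions with
  | [] => []
  | a0 :: rest0 =>
    let split_actions := (a0 :: rest0).map (fun a => (PySem.Str.split? a ":").getD [])
    if split_actions.length = 1 then
      let candidate := a0 ++ ":"
      if (10:Int) ≤ PySem.Str.len candidate then [candidate] else []
    else
      let reference := split_actions.headD []
      let common_depth := (split_actions.drop 1).foldl
        (fun cd parts => min cd (pyAgreeDepth reference parts)) reference.length
      let prefixes :=
        if 0 < common_depth then
          [PySem.Str.join ":" (reference.take common_depth) ++ ":"]
        else
          let first_segments := split_actions.map (fun parts => parts.headD "")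
          match pyMostCommon1 (PySem.Dict.counter first_segments).items with
          | [] => []
          | (k, _) :: _ => [k ++ ":"]
      prefixes.filter (fun p => (10:Int) ≤ PySem.Str.len p)

-- ===== PORT B =====
-- 'for col in zip(*rows): if len(set(col)) != 1: break; depth += 1'
def colDepth : List String → List (List String) → Nat
  | [], _ => 0
  | s :: rest, others =>
    if others.all (fun r => r.head? == some s) then colDepth rest (others.map List.tail) + 1 else 0

-- max(counts, key=counts.get): first key with maximal count, in insertion order
def firstMaxKey (d : PySem.Dict String Int) : String :=
  match d.keys with
  | [] => ""
  | k :: rest => rest.foldl (fun best k' => if d.getD best 0 < d.getD k' 0 then k' else best) k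

def extract_common_prefixes_py_alt (actions : List String) : List String :=
  match actions with
  | [] => []
  | a0 :: rest0 =>
    let rows := (a0 :: rest0).map (fun a => (PySem.Str.split? a ":").getD [])
    let depth := colDepth (rows.headD []) (rows.drop 1)
    let candidate :=
      if 0 < depth then
        PySem.Str.join ":" ((rows.headD []).take depth) ++ ":"
      else
        let counts := rows.foldl
          (fun d parts => d.insert (parts.headD "") (d.getD (parts.headD "") 0 + 1)) PySem.Dict.empty
        firstMaxKey counts ++ ":"
    if (10:Int) ≤ PySem.Str.len candidate then [candidate] else []

-- ===== PRECONDITION & SPEC =====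
def Spec_extract_common_prefixes_py (actions : List String) (out : List String) : Prop := out = extract_common_prefixes_py_alt actions
instance (actions : List String) (out : List String) : Decidable (Spec_extract_common_prefixes_py actions out) := by unfold Spec_extract_common_prefixes_py; infer_instance

-- ===== CLAIM (what is proved, stated in full; the proofs are below) =====
def Claim_equal_extract_common_prefixes_py : Prop := ∀ (actions : List String), Dom_extract_common_prefixes_py actions → Spec_extract_common_prefixes_py actions (extract_common_prefixes_py actions)

-- ===== LEMMAS AND PROOFS =====
theorem splitOn_not_mem (c : Char) (xs : List Char) (h : c ∉ xs) : xs.splitOn c = [xs] := by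
  induction xs with
  | nil => rfl
  | cons a as ih =>
    have ha : a ≠ c := fun e => h (e ▸ List.mem_cons_self ..)
    have has : c ∉ as := fun m => h (List.mem_cons_of_mem _ m)
    simp only [List.splitOn, List.splitOnP_cons, beq_iff_eq, if_neg ha]
    rw [List.splitOn] at ih
    rw [ih has]
    rfl
theorem splitOn_append_cons (c : Char) (xs ys : List Char) (h : c ∉ xs) :
    (xs ++ c :: ys).splitOn c = xs :: ys.splitOn c := by
  induction xs with
  | nil => simp [List.splitOn, List.splitOnP_cons]
  | cons a as ih =>
    have ha : a ≠ c := fun e => h (e ▸ List.mem_cons_self ..)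
    have has : c ∉ as := fun m => h (List.mem_cons_of_mem _ m)
    simp only [List.cons_append, List.splitOn, List.splitOnP_cons, beq_iff_eq, if_neg ha]
    rw [List.splitOn] at ih
    rw [ih has]
    rfl
theorem splitOn_go_eq (c : Char) : ∀ (fuel : Nat) (l cur : List Char) (acc : List (List Char)),
    l.length < fuel → c ∉ cur →
    PySem.Chars.splitOn.go [c] fuel l cur acc = acc.reverse ++ (cur.reverse ++ l).splitOn c := by
  intro fuel
  induction fuel with
  | zero => intro l cur acc h; omega
  | succ f ih =>
    intro l cur acc hl hc
    cases l with
    | nil =>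
      simp only [PySem.Chars.splitOn.go]
      rw [List.append_nil, splitOn_not_mem c cur.reverse (by simpa using hc)]
      simp
    | cons ch rest =>
      simp only [PySem.Chars.splitOn.go]
      by_cases hch : ch = c
      · subst hch
        have hpre : [ch].isPrefixOf (ch :: rest) = true := by simp [List.isPrefixOf]
        rw [if_pos hpre]
        have := ih rest [] (cur.reverse :: acc) (by simp at hl ⊢; omega) (by simp)
        rw [show List.drop [ch].length (ch :: rest) = rest by simp]
        rw [this]
        rw [splitOn_append_cons ch cur.reverse rest (by simpa using hc)]
        simp
      · have hpre : [c].isPrefixOf (ch :: rest) = false := by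
          simp [List.isPrefixOf]; exact fun e => absurd e.symm hch
        rw [if_neg (by simp [hpre])]
        rw [ih rest (ch :: cur) acc (by simp at hl ⊢; omega) (by simp [hc]; exact fun e => hch e.symm)]
        simp
theorem chars_splitOn_single (c : Char) (cs : List Char) :
    PySem.Chars.splitOn cs [c] = cs.splitOn c := by
  rw [PySem.Chars.splitOn, splitOn_go_eq c (cs.length+1) cs [] [] (by omega) (by simp)]
  simp

theorem split_colon_toList (s : String) :
    ((PySem.Str.split? s ":").getD []).map String.toList = s.toList.splitOn ':' := by
  have h := PySem.Str.split?_map s ":"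
  cases hs : PySem.Str.split? s ":" with
  | none => rw [hs] at h; simp [PySem.Chars.split?] at h
  | some parts =>
    rw [hs] at h
    simp only [Option.map_some, PySem.Chars.split?] at h
    have : (":".toList.isEmpty) = false := rfl
    rw [show (":".toList) = [':'] from rfl] at h
    simp at h
    simpa [h, chars_splitOn_single] using (chars_splitOn_single ':' s.toList ▸ h)

theorem split_colon_ne_nil (s : String) : (PySem.Str.split? s ":").getD [] ≠ [] := by
  intro h
  have := split_colon_toList s
  rw [h] at this
  exact List.splitOnP_ne_nil _ _ this.symm

theorem join_split_colon (s : String) :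
    PySem.Str.join ":" ((PySem.Str.split? s ":").getD []) = s := by
  have h1 : (PySem.Str.join ":" ((PySem.Str.split? s ":").getD [])).toList = s.toList := by
    rw [PySem.Str.toList_join, split_colon_toList]
    have := List.intercalate_splitOn s.toList ':'
    simpa [PySem.Chars.join] using this
  exact String.toList_inj.mp h1

theorem foldl_min_le (f : List String → Nat) : ∀ (rows : List (List String)) (c : Nat),
    rows.foldl (fun cd p => min cd (f p)) c ≤ c := by
  intro rows
  induction rows with
  | nil => simp
  | cons r rows ih =>
    intro c
    simp only [List.foldl_cons]
    exact le_trans (ih _) (Nat.min_le_left _ _)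

theorem foldl_min_zero_of_mem (f : List String → Nat) :
    ∀ (rows : List (List String)) (c : Nat), (∃ r ∈ rows, f r = 0) →
    rows.foldl (fun cd p => min cd (f p)) c = 0 := by
  intro rows
  induction rows with
  | nil => simp
  | cons r rows ih =>
    intro c ⟨w, hw, hw0⟩
    rcases List.mem_cons.mp hw with h | h
    · subst h
      simp only [List.foldl_cons, hw0, Nat.min_zero]
      exact Nat.le_zero.mp (foldl_min_le f rows 0)
    · exact ih _ ⟨w, h, hw0⟩

theorem foldl_min_succ (s : String) (rest : List String) :
    ∀ (rows : List (List String)) (c : Nat), (∀ r ∈ rows, r.head? = some s) →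
    rows.foldl (fun cd p => min cd (pyAgreeDepth (s :: rest) p)) (c + 1) =
      (rows.map List.tail).foldl (fun cd p => min cd (pyAgreeDepth rest p)) c + 1 := by
  intro rows
  induction rows with
  | nil => simp
  | cons r rows ih =>
    intro c hall
    have hr : r.head? = some s := hall r (List.mem_cons_self ..)
    cases r with
    | nil => simp at hr
    | cons x xs =>
      have hx : x = s := by simpa using hr
      subst hx
      simp only [List.foldl_cons, List.map_cons, List.tail_cons]
      rw [show pyAgreeDepth (x :: rest) (x :: xs) = pyAgreeDepth rest xs + 1 by simp [pyAgreeDepth]]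
      rw [show min (c+1) (pyAgreeDepth rest xs + 1) = min c (pyAgreeDepth rest xs) + 1 by omega]
      exact ih _ (fun r h => hall r (List.mem_cons_of_mem _ h))

theorem colDepth_eq_foldl : ∀ (ref : List String) (rows : List (List String)),
    colDepth ref rows = rows.foldl (fun cd parts => min cd (pyAgreeDepth ref parts)) ref.length := by
  intro ref
  induction ref with
  | nil =>
    intro rows
    simp only [colDepth, List.length_nil]
    exact (Nat.le_zero.mp (foldl_min_le _ rows 0)).symm
  | cons s rest ih =>
    intro rows
    by_cases h : ∀ r ∈ rows, r.head? = some s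
    · have hall : rows.all (fun r => r.head? == some s) = true := by
        simp only [List.all_eq_true]; intro r hr; simpa using h r hr
      simp only [colDepth, hall, if_pos]
      rw [ih, List.length_cons, foldl_min_succ s rest rows rest.length h]
    · push Not at h
      obtain ⟨w, hw, hne⟩ := h
      have hall : rows.all (fun r => r.head? == some s) = false := by
        simp only [List.all_eq_false]
        exact ⟨w, hw, by simpa using hne⟩
      simp only [colDepth, hall]
      rw [if_neg (by simp)]
      have hz : pyAgreeDepth (s :: rest) w = 0 := by
        cases w with
        | nil => rfl
        | cons y ys =>
          have : s ≠ y := fun e => hne (by simp [e.symm])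
          simp [pyAgreeDepth, this]
      exact (foldl_min_zero_of_mem _ rows _ ⟨w, hw, hz⟩).symm

theorem colDepth_nil_others : ∀ (ref : List String), colDepth ref [] = ref.length := by
  intro ref
  induction ref with
  | nil => rfl
  | cons s rest ih => simp [colDepth, ih]

theorem foldl_max_pair (d : PySem.Dict String Int) :
    ∀ (ks : List String) (k0 : String),
    ks.foldl (fun (best : String × Int) k => if best.2 < d.getD k 0 then (k, d.getD k 0) else best)
        (k0, d.getD k0 0) =
      (ks.foldl (fun best k => if d.getD best 0 < d.getD k 0 then k else best) k0,
       d.getD (ks.foldl (fun best k => if d.getD best 0 < d.getD k 0 then k else best) k0) 0) := by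
  intro ks
  induction ks with
  | nil => simp
  | cons k ks ih =>
    intro k0
    simp only [List.foldl_cons]
    by_cases h : d.getD k0 0 < d.getD k 0
    · rw [if_pos h, if_pos h, ih]
    · rw [if_neg h, if_neg h, ih]

theorem mostCommon_eq_firstMax (fs : List String) (hfs : fs ≠ []) :
    (match pyMostCommon1 (PySem.Dict.counter fs).items with
      | [] => ([] : List String)
      | (k, _) :: _ => [k ++ ":"]) =
    [firstMaxKey (PySem.Dict.counter fs) ++ ":"] := by
  have hnd := PySem.Dict.nodup_keys_counter fs
  have hitems := PySem.Dict.items_eq_map_keys (PySem.Dict.counter fs) hnd 0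
  have hkeys : (PySem.Dict.counter fs).keys ≠ [] := by
    obtain ⟨f, fs', rfl⟩ := List.exists_cons_of_ne_nil hfs
    have : f ∈ PySem.Set.ofList (f :: fs') := by
      rw [PySem.Set.mem_ofList]; exact List.mem_cons_self ..
    rw [PySem.Dict.keys_counter]
    exact List.ne_nil_of_mem this
  obtain ⟨k0, ks, hk⟩ := List.exists_cons_of_ne_nil hkeys
  rw [firstMaxKey, hitems, hk]
  simp only [List.map_cons, pyMostCommon1, List.foldl_map]
  rw [foldl_max_pair]

theorem filter_len_singleton (p : String) :
    [p].filter (fun q => decide ((10:Int) ≤ PySem.Str.len q)) =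
      if (10:Int) ≤ PySem.Str.len p then [p] else [] := by
  by_cases h : (10:Int) ≤ PySem.Str.len p
  · rw [if_pos h]; simp only [List.filter_cons, List.filter_nil, h, decide_true, if_true]
  · rw [if_neg h]; simp only [List.filter_cons, List.filter_nil, h, decide_false, Bool.false_eq_true, if_false]

theorem counts_fold_eq_counter : ∀ (rows : List (List String)),
    rows.foldl (fun d parts => d.insert (parts.headD "")
        (d.getD (parts.headD "") 0 + 1)) PySem.Dict.empty =
      PySem.Dict.counter (rows.map (fun parts => parts.headD "")) := by
  intro rows
  rw [← PySem.Dict.foldl_insert_getD_add_one_eq_counter, List.foldl_map]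

theorem ports_agree : ∀ (actions : List String),
    extract_common_prefixes_py actions = extract_common_prefixes_py_alt actions := by
  intro actions
  match actions with
  | [] => rfl
  | [a0] =>
    simp only [extract_common_prefixes_py, extract_common_prefixes_py_alt, List.map_cons,
      List.map_nil, List.length_cons, List.length_nil, List.headD_cons, List.drop_succ_cons,
      List.drop_nil, colDepth_nil_others, if_true]
    have hpos : 0 < ((PySem.Str.split? a0 ":").getD []).length :=
      List.length_pos_iff.mpr (split_colon_ne_nil a0)
    rw [if_pos hpos, List.take_length, join_split_colon]
  | a0 :: a1 :: rest1 =>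
    simp only [extract_common_prefixes_py, extract_common_prefixes_py_alt, List.map_cons,
      List.length_cons, List.headD_cons, List.drop_succ_cons, List.drop_zero]
    rw [if_neg (by omega)]
    rw [← colDepth_eq_foldl]
    by_cases hd : 0 < colDepth ((PySem.Str.split? a0 ":").getD [])
        ((PySem.Str.split? a1 ":").getD [] :: rest1.map (fun a => (PySem.Str.split? a ":").getD []))
    · rw [if_pos hd, if_pos hd, filter_len_singleton]
    · rw [if_neg hd, if_neg hd, counts_fold_eq_counter]
      simp only [List.map_cons]
      rw [mostCommon_eq_firstMax _ (by simp), filter_len_singleton]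

-- ===== VERDICT (by name: the statement is the Claim_ definition above) =====
theorem extract_common_prefixes_py_spec : Claim_equal_extract_common_prefixes_py := by
  intro actions _
  unfold Spec_extract_common_prefixes_py
  exact ports_agree actions
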